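-- pv_equiv track=rewrite | github.com/zukash/ctf-writeup | 2023/CryptoCTF/crypto/blue_office/blue_office.mod.py | gen_seed
-- ===== SOURCE A (Python) =====
-- def gen_seed(s):
--     i, j, k = 0, len(s), 0
--     while i < j:
--         k = k + ord(s[i])
--         i += 1
--     i = 0
--     while i < j:
--         if (i % 2) != 0:
--             k = k - (ord(s[i]) * (j - i + 1))
--         else:
--             k = k + (ord(s[i]) * (j - i + 1))
--
--         k = k % 2147483647
--         i += 1
--
--     k = (k * j) % 2147483647
--     return k
-- ===== SOURCE B (Python) =====
-- def gen_seed(s):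
--     j = len(s)
--     k = 0
--     for i, c in enumerate(s):
--         w = ord(c) * (j - i + 1)
--         k += ord(c) + (w if i % 2 == 0 else -w)
--         k %= 2147483647
--     return (k * j) % 2147483647
-- ===== Notes on version B (the rewrite author's own statement) =====
-- stated objective: faster
-- what changed: B fuses A's two sequential index-driven while loops into a single enumerate pass that adds both the plain-ord and the signed weighted contribution of each character at once, reducing modulo each step; correctness relies on modular congruence, not A's loop order.
import Mathlib
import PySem

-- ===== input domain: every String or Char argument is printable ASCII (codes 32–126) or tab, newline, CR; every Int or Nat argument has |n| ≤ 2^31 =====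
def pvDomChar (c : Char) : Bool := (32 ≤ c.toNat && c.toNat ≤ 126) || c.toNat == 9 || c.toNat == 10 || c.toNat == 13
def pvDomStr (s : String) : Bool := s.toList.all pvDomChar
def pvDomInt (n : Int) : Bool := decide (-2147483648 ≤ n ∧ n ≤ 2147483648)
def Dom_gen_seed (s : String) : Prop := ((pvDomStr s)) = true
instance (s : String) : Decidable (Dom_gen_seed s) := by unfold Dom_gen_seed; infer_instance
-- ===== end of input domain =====

-- B fuses A's two sequential while loops into one enumerate pass; return value identical.

-- ===== PORT A =====
-- ord(s[i]) with 0 ≤ i < len(s): index is always in range, so pyGetD with a dummy default is exact.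
def gen_seed (s : String) : Int :=
  let j : Int := PySem.Str.len s
  -- first while loop: k = k + ord(s[i])
  let k1 : Int := (PySem.List.pyRange 0 j 1).foldl
    (fun k i => k + ((PySem.List.pyGetD s.toList i ' ').toNat : Int)) 0
  -- second while loop: signed weighted add, then k % 2147483647 each iteration
  let k2 : Int := (PySem.List.pyRange 0 j 1).foldl
    (fun k i =>
      PySem.Int.mod
        (if PySem.Int.mod i 2 ≠ 0 then
           k - ((PySem.List.pyGetD s.toList i ' ').toNat : Int) * (j - i + 1)
         else
           k + ((PySem.List.pyGetD s.toList i ' ').toNat : Int) * (j - i + 1))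
        2147483647) k1
  PySem.Int.mod (k2 * j) 2147483647

-- ===== PORT B =====
def gen_seed_alt (s : String) : Int :=
  let j : Int := PySem.Str.len s
  let k : Int := (PySem.List.enumerate s.toList 0).foldl
    (fun k p =>
      let w : Int := (p.2.toNat : Int) * (j - p.1 + 1)
      PySem.Int.mod (k + ((p.2.toNat : Int) + (if PySem.Int.mod p.1 2 = 0 then w else -w))) 2147483647) 0
  PySem.Int.mod (k * j) 2147483647

-- ===== PRECONDITION & SPEC =====
def Spec_gen_seed (s : String) (out : Int) : Prop := out = gen_seed_alt s
instance (s : String) (out : Int) : Decidable (Spec_gen_seed s out) := by unfold Spec_gen_seed; infer_instance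

-- ===== CLAIM (what is proved, stated in full; the proofs are below) =====
def Claim_equal_gen_seed : Prop := ∀ (s : String), Dom_gen_seed s → Spec_gen_seed s (gen_seed s)

-- ===== LEMMAS AND PROOFS =====

-- plain accumulation fold = init + sum of contributions
theorem foldl_add_sum {α : Type} (d : α → Int) :
    ∀ (ps : List α) (init : Int),
      ps.foldl (fun k p => k + d p) init = init + (ps.map d).sum := by
  intro ps
  induction ps with
  | nil => simp
  | cons p ps ih => intro init; simp [List.foldl_cons, ih]; ring

-- fold that reduces mod M each step is congruent (mod M) to init + sum
theorem foldl_mod_sum {α : Type} (d : α → Int) (M : Int) :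
    ∀ (ps : List α) (init : Int),
      (ps.foldl (fun k p => (k + d p) % M) init) % M = (init + (ps.map d).sum) % M := by
  intro ps
  induction ps with
  | nil => simp
  | cons p ps ih =>
      intro init
      simp only [List.foldl_cons, List.map_cons, List.sum_cons]
      rw [ih, Int.emod_add_emod]
      ring_nf

theorem sum_map_add' {α : Type} (f g : α → Int) (ps : List α) :
    (ps.map (fun p => f p + g p)).sum = (ps.map f).sum + (ps.map g).sum := by
  induction ps with
  | nil => simp
  | cons p ps ih => simp [ih]; ring

theorem foldl_ext {α β : Type} (f g : β → α → β) (init : β) (l : List α)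
    (h : ∀ b a, f b a = g b a) : l.foldl f init = l.foldl g init := by
  have : f = g := by funext b a; exact h b a
  rw [this]

theorem gen_seed_spec : Claim_equal_gen_seed := by
  intro s _
  unfold Spec_gen_seed gen_seed gen_seed_alt
  simp only []
  set cs := s.toList with hcs
  have hMpos : (0 : Int) < 2147483647 := by norm_num
  have hlen : PySem.Str.len s = (cs.length : Int) := by
    simp [PySem.Str.len_eq, hcs]
  rw [hlen]
  set j : Int := (cs.length : Int) with hj
  -- first loop of A: sum of ords
  have h1 : (PySem.List.pyRange 0 j 1).foldl
      (fun k i => k + ((PySem.List.pyGetD cs i ' ').toNat : Int)) 0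
      = (cs.map (fun c => (c.toNat : Int))).sum := by
    have hthis := PySem.List.foldl_pyRange_zero_pyGetD cs ' '
      (fun (k : Int) (c : Char) => k + (c.toNat : Int)) 0
    have hlen' : PySem.List.len cs = j := by simp [hj]
    rw [hlen'] at hthis
    rw [hthis, foldl_add_sum (fun c : Char => ((c.toNat : Int))) cs 0]
    simp
  -- rewrite A's second loop as a fold over enumerate
  have henum : PySem.List.enumerate cs 0
      = (PySem.List.pyRange 0 j 1).map (fun i => (i, PySem.List.pyGetD cs i ' ')) := by
    have hthis := PySem.List.enumerate_eq_map_pyRange cs ' '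
    have hlen' : PySem.List.len cs = j := by simp [hj]
    rw [hlen'] at hthis
    exact hthis
  -- abbreviations for per-element contributions
  set o : Int × Char → Int := fun p => ((p.2.toNat : Int)) with ho
  set dA : Int × Char → Int := fun p =>
    if PySem.Int.mod p.1 2 ≠ 0 then -((p.2.toNat : Int) * (j - p.1 + 1))
    else (p.2.toNat : Int) * (j - p.1 + 1) with hdA
  -- A's second fold, as fold over enumerate with mod each step
  have h2 : (PySem.List.pyRange 0 j 1).foldl
      (fun k i =>
        PySem.Int.mod
          (if PySem.Int.mod i 2 ≠ 0 then
             k - ((PySem.List.pyGetD cs i ' ').toNat : Int) * (j - i + 1)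
           else
             k + ((PySem.List.pyGetD cs i ' ').toNat : Int) * (j - i + 1))
          2147483647)
      ((cs.map (fun c => (c.toNat : Int))).sum)
      = (PySem.List.enumerate cs 0).foldl
          (fun k p => (k + dA p) % 2147483647)
          ((cs.map (fun c => (c.toNat : Int))).sum) := by
    rw [henum, List.foldl_map]
    apply foldl_ext
    intro k i
    rw [PySem.Int.mod_eq_emod_of_pos hMpos]
    simp only [hdA]
    split <;> ring_nf
  -- B's fold as a mod-each-step fold with contribution o + dA
  have h3 : (PySem.List.enumerate cs 0).foldl
      (fun k p =>
        PySem.Int.mod (k + ((p.2.toNat : Int) +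
          (if PySem.Int.mod p.1 2 = 0 then (p.2.toNat : Int) * (j - p.1 + 1)
           else -((p.2.toNat : Int) * (j - p.1 + 1))))) 2147483647) 0
      = (PySem.List.enumerate cs 0).foldl
          (fun k p => (k + (o p + dA p)) % 2147483647) 0 := by
    apply foldl_ext
    intro k p
    rw [PySem.Int.mod_eq_emod_of_pos hMpos]
    simp only [ho, hdA]
    by_cases h : PySem.Int.mod p.1 2 = 0
    · rw [if_pos h, if_neg (fun hne => hne h)]
    · rw [if_neg h, if_pos h]
  -- ords sum: map o over enumerate = map ord over cs
  have hos : ((PySem.List.enumerate cs 0).map o).sum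
      = (cs.map (fun c => (c.toNat : Int))).sum := by
    have hmm : (PySem.List.enumerate cs 0).map o
        = List.map (fun c : Char => ((c.toNat : Int)))
            (List.map (fun p : Int × Char => p.2) (PySem.List.enumerate cs 0)) := by
      rw [List.map_map]; rfl
    rw [hmm, PySem.List.map_snd_enumerate]
  -- put everything together via congruence mod M
  rw [PySem.Int.mod_eq_emod_of_pos hMpos, PySem.Int.mod_eq_emod_of_pos hMpos]
  rw [h1, h2, h3]
  rw [Int.mul_emod]
  conv_rhs => rw [Int.mul_emod]
  rw [foldl_mod_sum dA 2147483647, foldl_mod_sum (fun p => o p + dA p) 2147483647]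
  rw [sum_map_add' o dA, hos]
  ring_nf
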